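-- pv_equiv track=rewrite | github.com/vparent/ProjetAnonymisation | funs_attack/fonc_attac/tt_test.py | check_prices_items
-- ===== SOURCE A (Python) =====
-- def check_prices_items(rows):
--     """
--     DMA
--     :param rows: (dict) rows of csv file
--     :return: (dict) keys : id_item, values : (list) prices for this item
--     """
--     dico = dict()
--     for r in rows:
--         if r['id_item'] in dico.keys():
--             if not r['price'] in dico[r['id_item']].keys():
--                 dico[r['id_item']][r['price']] = 1
--             else:
--                 dico[r['id_item']][r['price']] += 1
--         else:
--             dico[r['id_item']] = {r['price']: 1}
--     return dico
-- ===== SOURCE B (Python) =====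
-- def check_prices_items(rows):
--     """
--     DMA
--     :param rows: (dict) rows of csv file
--     :return: (dict) keys : id_item, values : (list) prices for this item
--     """
--     counts = {}
--     for r in rows:
--         key = (r['id_item'], r['price'])
--         counts[key] = counts.get(key, 0) + 1
--     dico = {}
--     for (item, price), cnt in counts.items():
--         dico.setdefault(item, {})[price] = cnt
--     return dico
-- ===== Notes on version B (the rewrite author's own statement) =====
-- stated objective: alternative
-- what changed: B is a two-phase decomposition: it first builds one flat count table keyed by the (id_item, price) pair in a single pass, then reshapes that table into the nested per-item dict, instead of A's incremental growth of the nested dict with membership tests while scanning.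
import Mathlib
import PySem

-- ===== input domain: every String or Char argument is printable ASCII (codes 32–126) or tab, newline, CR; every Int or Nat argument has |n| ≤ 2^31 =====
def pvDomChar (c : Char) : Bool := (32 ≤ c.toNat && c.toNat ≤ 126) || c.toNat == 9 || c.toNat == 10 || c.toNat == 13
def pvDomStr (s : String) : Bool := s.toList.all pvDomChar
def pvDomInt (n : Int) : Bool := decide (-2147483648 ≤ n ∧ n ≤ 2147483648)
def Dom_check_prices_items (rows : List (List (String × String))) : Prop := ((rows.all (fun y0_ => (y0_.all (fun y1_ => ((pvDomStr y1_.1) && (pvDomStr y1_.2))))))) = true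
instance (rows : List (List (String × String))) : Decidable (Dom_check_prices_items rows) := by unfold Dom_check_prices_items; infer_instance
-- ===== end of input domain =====

-- B replaces A's incremental nested-dict build by a flat (id_item, price) count table built
-- in one pass and then reshaped into the nested dict; alternative decomposition, same cost.

-- ===== PORT A =====
-- loop body of A's single pass (the per-row update of the nested dict); like the Python,
-- it looks dico[r['id_item']] up repeatedly rather than naming it
def stepA (d : PySem.Dict String (PySem.Dict String Int)) (i p : String) :
    PySem.Dict String (PySem.Dict String Int) :=
  if d.contains i then
    if (d.getD i PySem.Dict.empty).contains p then
      d.insert i ((d.getD i PySem.Dict.empty).insert p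
        ((d.getD i PySem.Dict.empty).getD p 0 + 1))
    else
      d.insert i ((d.getD i PySem.Dict.empty).insert p 1)
  else d.insert i (PySem.Dict.ofList [(p, 1)])

-- one iteration of 'for r in rows'; Option threads the KeyError of r['id_item'] / r['price']
def stepArow (acc : Option (PySem.Dict String (PySem.Dict String Int)))
    (r : List (String × String)) : Option (PySem.Dict String (PySem.Dict String Int)) :=
  acc.bind fun d =>
    match (PySem.Dict.ofList r).get? "id_item" with
    | none => none
    | some i =>
      match (PySem.Dict.ofList r).get? "price" with
      | none => none
      | some p => some (stepA d i p)

def check_prices_items (rows : List (List (String × String))) :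
    List (String × List (String × Int)) :=
  match rows.foldl stepArow (some PySem.Dict.empty) with
  | some d => d.items.map (fun e => (e.1, e.2.items))
  | none => []   -- unreachable under Pre_ (Python raises KeyError there)

-- ===== PORT B =====
-- phase 1 loop body: counts[key] = counts.get(key, 0) + 1; Option threads KeyError
def stepBrow (acc : Option (PySem.Dict (String × String) Int))
    (r : List (String × String)) : Option (PySem.Dict (String × String) Int) :=
  acc.bind fun c =>
    match (PySem.Dict.ofList r).get? "id_item" with
    | none => none
    | some i =>
      match (PySem.Dict.ofList r).get? "price" with
      | none => none
      | some p => some (c.insert (i, p) (c.getD (i, p) 0 + 1))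

-- phase 2 loop body: dico.setdefault(item, {})[price] = cnt
def stepB (d : PySem.Dict String (PySem.Dict String Int))
    (e : (String × String) × Int) : PySem.Dict String (PySem.Dict String Int) :=
  (d.setdefault e.1.1 PySem.Dict.empty).insert e.1.1
    (((d.setdefault e.1.1 PySem.Dict.empty).getD e.1.1 PySem.Dict.empty).insert e.1.2 e.2)

def check_prices_items_alt (rows : List (List (String × String))) :
    List (String × List (String × Int)) :=
  match rows.foldl stepBrow (some PySem.Dict.empty) with
  | some c => (c.items.foldl stepB PySem.Dict.empty).items.map (fun e => (e.1, e.2.items))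
  | none => []   -- unreachable under Pre_ (Python raises KeyError there)

-- ===== PRECONDITION & SPEC =====
-- Pre_ excludes exactly the rows missing the 'id_item' or 'price' key, on which Python A raises KeyError.
def Pre_check_prices_items (rows : List (List (String × String))) : Prop :=
  (rows.all (fun r => (PySem.Dict.ofList r).contains "id_item"
                      && (PySem.Dict.ofList r).contains "price")) = true

instance (rows : List (List (String × String))) : Decidable (Pre_check_prices_items rows) := by
  unfold Pre_check_prices_items; infer_instance

def pvWitness_check_prices_items : (List (List (String × String))) :=
  [[("id_item", "a"), ("price", "1")], [("id_item", "a"), ("price", "2")]]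

def Spec_check_prices_items (rows : List (List (String × String)))
    (out : List (String × List (String × Int))) : Prop := out = check_prices_items_alt rows

instance (rows : List (List (String × String))) (out : List (String × List (String × Int))) :
    Decidable (Spec_check_prices_items rows out) := by
  unfold Spec_check_prices_items; infer_instance

-- ===== CLAIM (what is proved, stated in full; the proofs are below) =====
def Claim_equal_check_prices_items : Prop :=
  ∀ (rows : List (List (String × String))), Dom_check_prices_items rows →
    Pre_check_prices_items rows →
    Spec_check_prices_items rows (check_prices_items rows)

-- ===== LEMMAS AND PROOFS =====

-- generic facts about "table" dicts mk (S.map (fun j => (j, f j)))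

theorem tab_keys {α β : Type} [BEq α] (S : List α) (f : α → β) :
    (PySem.Dict.mk (S.map (fun j => (j, f j)))).keys = S := by
  simp [PySem.Dict.keys_mk, List.map_map, Function.comp_def]

theorem tab_contains {α β : Type} [BEq α] [LawfulBEq α] (S : List α) (f : α → β) (i : α) :
    (PySem.Dict.mk (S.map (fun j => (j, f j)))).contains i = true ↔ i ∈ S := by
  rw [PySem.Dict.contains_iff_mem_keys, tab_keys]

theorem tab_getD {α β : Type} [BEq α] [LawfulBEq α] {S : List α} (f : α → β) {i : α}
    (hS : S.Nodup) (hi : i ∈ S) (d0 : β) :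
    (PySem.Dict.mk (S.map (fun j => (j, f j)))).getD i d0 = f i := by
  apply PySem.Dict.getD_of_mem_items
  · exact List.mem_map_of_mem hi
  · rw [tab_keys]; exact hS

theorem tab_insert_mem {α β : Type} [BEq α] [LawfulBEq α] {S : List α} (f : α → β) {i : α}
    (hi : i ∈ S) (v : β) :
    (PySem.Dict.mk (S.map (fun j => (j, f j)))).insert i v
      = PySem.Dict.mk (S.map (fun j => (j, if j == i then v else f j))) := by
  apply PySem.Dict.ext
  rw [PySem.Dict.items_insert_of_contains _ v (by rw [tab_contains]; exact hi)]
  show (S.map (fun j => (j, f j))).map _ = _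
  rw [List.map_map]
  apply List.map_congr_left
  intro a _
  by_cases h : a == i
  · simp [Function.comp, eq_of_beq h]
  · simp [Function.comp, h]

theorem tab_insert_not_mem {α β : Type} [BEq α] [LawfulBEq α] {S : List α} (f : α → β) {i : α}
    (hi : i ∉ S) (v : β) :
    (PySem.Dict.mk (S.map (fun j => (j, f j)))).insert i v
      = PySem.Dict.mk (S.map (fun j => (j, f j)) ++ [(i, v)]) := by
  apply PySem.Dict.ext
  rw [PySem.Dict.items_insert_of_not_contains _ v
    (by rw [Bool.eq_false_iff]; intro h; exact hi ((tab_contains S f i).mp h))]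

-- dedup commutes with map through Set.ofList
theorem ofList_map_ofList {α β : Type} [BEq α] [LawfulBEq α] [BEq β] [LawfulBEq β]
    (l : List α) (f : α → β) :
    PySem.Set.ofList ((PySem.Set.ofList l).map f) = PySem.Set.ofList (l.map f) := by
  induction l using List.reverseRecOn with
  | nil => rfl
  | append_singleton l x ih =>
    rw [PySem.Set.ofList_append_singleton, List.map_append, List.map_singleton,
        PySem.Set.ofList_append_singleton, ← ih]
    by_cases hx : x ∈ l
    · rw [PySem.Set.add_of_mem ((PySem.Set.mem_ofList _ _).mpr hx),
          PySem.Set.add_of_mem (by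
            rw [PySem.Set.mem_ofList]
            exact List.mem_map_of_mem ((PySem.Set.mem_ofList _ _).mpr hx))]
    · rw [PySem.Set.add_of_not_mem (by rw [PySem.Set.mem_ofList]; exact hx),
          List.map_append, List.map_singleton, PySem.Set.ofList_append_singleton]

theorem count_snoc_ne {α : Type} [BEq α] [LawfulBEq α] {k x : α} (l : List α) (h : k ≠ x) :
    (l ++ [x]).count k = l.count k := by
  rw [List.count_append]
  have h0 : List.count k [x] = 0 := List.count_eq_zero.mpr (by simp [h])
  rw [h0, add_zero]

theorem count_snoc_self {α : Type} [BEq α] [LawfulBEq α] (l : List α) (x : α) :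
    (l ++ [x]).count x = l.count x + 1 := by
  simp [List.count_append]

-- the canonical value both folds reach: outer keys in first-appearance order, inner keys in
-- first-appearance order per item, inner values = multiplicities of the (id, price) pair
def pricesOf (l : List (String × String)) (i : String) : List String :=
  ((PySem.Set.ofList l).filter (fun k => k.1 == i)).map (fun k => k.2)

def innerD (l : List (String × String)) (i : String) : PySem.Dict String Int :=
  PySem.Dict.mk ((pricesOf l i).map (fun p => (p, (l.count (i, p) : Int))))

def canon (l : List (String × String)) : PySem.Dict String (PySem.Dict String Int) :=
  PySem.Dict.mk ((PySem.Set.ofList (l.map (fun k => k.1))).map (fun i => (i, innerD l i)))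

theorem mem_pricesOf (l : List (String × String)) (i p : String) :
    p ∈ pricesOf l i ↔ (i, p) ∈ l := by
  unfold pricesOf
  constructor
  · intro hmem
    obtain ⟨k, hk, rfl⟩ := List.mem_map.mp hmem
    have h1 : k.1 = i := eq_of_beq (List.mem_filter.mp hk).2
    have h2 : k ∈ l := (PySem.Set.mem_ofList _ _).mp (List.mem_of_mem_filter hk)
    rw [← h1]; exact h2
  · intro hmem
    exact List.mem_map.mpr ⟨(i, p),
      List.mem_filter.mpr ⟨(PySem.Set.mem_ofList _ _).mpr hmem, by simp⟩, rfl⟩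

theorem nodup_pricesOf (l : List (String × String)) (i : String) :
    (pricesOf l i).Nodup := by
  unfold pricesOf
  refine List.Nodup.map_on ?_ (List.Nodup.filter _ (PySem.Set.nodup_ofList l))
  intro k1 h1 k2 h2 he
  have e1 : k1.1 = i := eq_of_beq (List.mem_filter.mp h1).2
  have e2 : k2.1 = i := eq_of_beq (List.mem_filter.mp h2).2
  exact Prod.ext (e1.trans e2.symm) he

-- prices of other items are untouched by appending an (i, p) row
theorem pricesOf_snoc_ne (l : List (String × String)) {i j : String} (p : String)
    (hj : j ≠ i) : pricesOf (l ++ [(i, p)]) j = pricesOf l j := by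
  unfold pricesOf
  rw [PySem.Set.ofList_append_singleton]
  by_cases hx : (i, p) ∈ l
  · rw [PySem.Set.add_of_mem ((PySem.Set.mem_ofList _ _).mpr hx)]
  · rw [PySem.Set.add_of_not_mem (by rw [PySem.Set.mem_ofList]; exact hx),
        List.filter_append]
    simp [hj.symm]

theorem innerD_snoc_ne (l : List (String × String)) {i j : String} (p : String)
    (hj : j ≠ i) : innerD (l ++ [(i, p)]) j = innerD l j := by
  unfold innerD
  rw [pricesOf_snoc_ne l p hj]
  apply congrArg PySem.Dict.mk
  apply List.map_congr_left
  intro q _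
  have : (j, q) ≠ (i, p) := by intro h; exact hj (congrArg Prod.fst h)
  rw [count_snoc_ne _ this]

theorem stepA_canon (l : List (String × String)) (i p : String) :
    stepA (canon l) i p = canon (l ++ [(i, p)]) := by
  have hofs : (l ++ [(i, p)]).map (fun k : String × String => k.1)
      = l.map (fun k => k.1) ++ [i] := by simp
  by_cases hi : i ∈ l.map (fun k : String × String => k.1)
  · -- item already present
    have houter : PySem.Set.ofList ((l ++ [(i, p)]).map (fun k => k.1))
        = PySem.Set.ofList (l.map (fun k => k.1)) := by
      rw [hofs, PySem.Set.ofList_append_singleton,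
          PySem.Set.add_of_mem ((PySem.Set.mem_ofList _ _).mpr hi)]
    have hcont : (canon l).contains i = true := by
      unfold canon; rw [tab_contains]; exact (PySem.Set.mem_ofList _ _).mpr hi
    have hgetD : (canon l).getD i PySem.Dict.empty = innerD l i := by
      unfold canon
      exact tab_getD _ (PySem.Set.nodup_ofList _) ((PySem.Set.mem_ofList _ _).mpr hi) _
    have houtins : ∀ v, (canon l).insert i v
        = PySem.Dict.mk ((PySem.Set.ofList (l.map (fun k => k.1))).map
            (fun j => (j, if j == i then v else innerD l j))) := by
      intro v; unfold canon; exact tab_insert_mem _ ((PySem.Set.mem_ofList _ _).mpr hi) v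
    have hcanon : canon (l ++ [(i, p)])
        = PySem.Dict.mk ((PySem.Set.ofList (l.map (fun k => k.1))).map
            (fun j => (j, if j == i then innerD (l ++ [(i, p)]) i else innerD l j))) := by
      unfold canon
      rw [houter]
      apply congrArg PySem.Dict.mk
      apply List.map_congr_left
      intro j _
      by_cases hji : j = i
      · subst hji; simp
      · have hb : (j == i) = false := beq_eq_false_iff_ne.mpr hji
        rw [hb, innerD_snoc_ne l p hji]
        simp
    by_cases hp : (i, p) ∈ l
    · have hpc : (innerD l i).contains p = true := by
        unfold innerD; rw [tab_contains]; exact (mem_pricesOf l i p).mpr hp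
      have hpg : (innerD l i).getD p 0 = (l.count (i, p) : Int) := by
        unfold innerD; exact tab_getD _ (nodup_pricesOf l i) ((mem_pricesOf l i p).mpr hp) _
      have hins : (innerD l i).insert p ((l.count (i, p) : Int) + 1)
          = innerD (l ++ [(i, p)]) i := by
        unfold innerD
        rw [tab_insert_mem _ ((mem_pricesOf l i p).mpr hp)]
        have hpr : pricesOf (l ++ [(i, p)]) i = pricesOf l i := by
          unfold pricesOf
          rw [PySem.Set.ofList_append_singleton,
              PySem.Set.add_of_mem ((PySem.Set.mem_ofList _ _).mpr hp)]
        rw [hpr]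
        apply congrArg PySem.Dict.mk
        apply List.map_congr_left
        intro q _
        by_cases hqp : q = p
        · subst hqp; rw [count_snoc_self]; push_cast; simp
        · have hne : (i, q) ≠ (i, p) := by
            intro h; exact hqp (congrArg Prod.snd h)
          rw [count_snoc_ne _ hne]
          simp [hqp]
      unfold stepA
      rw [if_pos hcont, hgetD, if_pos hpc, hpg, hins, houtins, hcanon]
    · have hpc : (innerD l i).contains p = false := by
        rw [Bool.eq_false_iff]; intro h
        exact hp ((mem_pricesOf l i p).mp ((tab_contains _ _ _).mp h))
      have hins : (innerD l i).insert p 1 = innerD (l ++ [(i, p)]) i := by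
        unfold innerD
        rw [tab_insert_not_mem _ (fun h => hp ((mem_pricesOf l i p).mp h))]
        have hpr : pricesOf (l ++ [(i, p)]) i = pricesOf l i ++ [p] := by
          unfold pricesOf
          rw [PySem.Set.ofList_append_singleton,
              PySem.Set.add_of_not_mem (by rw [PySem.Set.mem_ofList]; exact hp),
              List.filter_append]
          simp
        rw [hpr]
        apply congrArg PySem.Dict.mk
        rw [List.map_append]
        congr 1
        · apply List.map_congr_left
          intro q hq
          have hne : (i, q) ≠ (i, p) := by
            intro h; exact hp (by rw [← h]; exact (mem_pricesOf l i q).mp hq)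
          rw [count_snoc_ne _ hne]
        · rw [List.map_singleton, count_snoc_self,
              List.count_eq_zero_of_not_mem hp]
          rfl
      unfold stepA
      rw [if_pos hcont, hgetD, if_neg (by rw [hpc]; simp), hins, houtins, hcanon]
  · -- fresh item: appended at the end
    have hcont : (canon l).contains i = false := by
      rw [Bool.eq_false_iff]; intro h
      exact hi ((PySem.Set.mem_ofList _ _).mp ((tab_contains _ _ _).mp h))
    have hx : (i, p) ∉ l := fun h => hi (List.mem_map_of_mem h)
    have houter : PySem.Set.ofList ((l ++ [(i, p)]).map (fun k => k.1))
        = PySem.Set.ofList (l.map (fun k => k.1)) ++ [i] := by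
      rw [hofs, PySem.Set.ofList_append_singleton,
          PySem.Set.add_of_not_mem (by rw [PySem.Set.mem_ofList]; exact hi)]
    have h0 : (PySem.Set.ofList l).filter (fun k : String × String => k.1 == i) = [] := by
      rw [List.filter_eq_nil_iff]
      intro k hk hki
      apply hi
      rw [← eq_of_beq hki]
      exact List.mem_map.mpr ⟨k, (PySem.Set.mem_ofList _ _).mp hk, rfl⟩
    have hpr : pricesOf (l ++ [(i, p)]) i = [p] := by
      unfold pricesOf
      rw [PySem.Set.ofList_append_singleton,
          PySem.Set.add_of_not_mem (by rw [PySem.Set.mem_ofList]; exact hx),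
          List.filter_append, h0]
      simp
    have hnew : innerD (l ++ [(i, p)]) i = PySem.Dict.ofList [(p, 1)] := by
      unfold innerD
      rw [hpr]
      show PySem.Dict.mk [(p, (((l ++ [(i, p)]).count (i, p) : Nat) : Int))]
        = PySem.Dict.ofList [(p, 1)]
      rw [count_snoc_self, List.count_eq_zero_of_not_mem hx]
      rfl
    unfold stepA
    rw [if_neg (by rw [hcont]; simp), ← hnew]
    show (PySem.Dict.mk ((PySem.Set.ofList (l.map (fun k => k.1))).map
        (fun j => (j, innerD l j)))).insert i (innerD (l ++ [(i, p)]) i)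
      = canon (l ++ [(i, p)])
    rw [tab_insert_not_mem _ (fun h => hi ((PySem.Set.mem_ofList _ _).mp h))]
    unfold canon
    rw [houter]
    apply congrArg PySem.Dict.mk
    rw [List.map_append]
    congr 1
    apply List.map_congr_left
    intro j hj
    have hji : j ≠ i := by
      intro h; subst h; exact hi ((PySem.Set.mem_ofList _ _).mp hj)
    rw [innerD_snoc_ne l p hji]

-- A's fold computes the canonical value
theorem lemA (l : List (String × String)) :
    l.foldl (fun d x => stepA d x.1 x.2) PySem.Dict.empty = canon l := by
  induction l using List.reverseRecOn with
  | nil => rfl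
  | append_singleton l x ih =>
    rw [List.foldl_append, ih]
    show stepA (canon l) x.1 x.2 = canon (l ++ [x])
    rw [stepA_canon]

-- B's reshape of any flat table with distinct keys
def GG (L : List ((String × String) × Int)) : PySem.Dict String (PySem.Dict String Int) :=
  PySem.Dict.mk ((PySem.Set.ofList (L.map (fun e => e.1.1))).map (fun i =>
    (i, PySem.Dict.mk ((L.filter (fun e => e.1.1 == i)).map (fun e => (e.1.2, e.2))))))

theorem lemG (L : List ((String × String) × Int)) (h : (L.map (fun e => e.1)).Nodup) :
    L.foldl stepB PySem.Dict.empty = GG L := by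
  induction L using List.reverseRecOn with
  | nil => rfl
  | append_singleton L e ih =>
    rw [show (L ++ [e]).map (fun e => e.1) = L.map (fun e => e.1) ++ [e.1] by simp] at h
    obtain ⟨hL, -, hdisj⟩ := List.nodup_append.mp h
    rw [List.foldl_append, ih hL]
    show stepB (GG L) e = GG (L ++ [e])
    obtain ⟨⟨i, p⟩, n⟩ := e
    have hx : (i, p) ∉ L.map (fun e => e.1) := fun hm => hdisj _ hm _ (by simp) rfl
    have hfilterne : ∀ (j : String), j ≠ i →
        (L ++ [((i, p), n)]).filter (fun e => e.1.1 == j)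
          = L.filter (fun e => e.1.1 == j) := by
      intro j hj
      rw [List.filter_append,
          show List.filter (fun e => e.1.1 == j) [((i, p), n)] = [] by simp [Ne.symm hj],
          List.append_nil]
    have hfilteri : (L ++ [((i, p), n)]).filter (fun e => e.1.1 == i)
        = L.filter (fun e => e.1.1 == i) ++ [((i, p), n)] := by
      rw [List.filter_append]; simp
    by_cases hiS : i ∈ L.map (fun e => e.1.1)
    · -- item already present: inner dict gains (p, n) at its end, outer order unchanged
      have hiS' : i ∈ PySem.Set.ofList (L.map (fun e => e.1.1)) :=
        (PySem.Set.mem_ofList _ _).mpr hiS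
      have hcont : (GG L).contains i = true := by
        unfold GG; rw [tab_contains]; exact hiS'
      have hgetD : (GG L).getD i PySem.Dict.empty
          = PySem.Dict.mk ((L.filter (fun e => e.1.1 == i)).map (fun e => (e.1.2, e.2))) := by
        unfold GG; exact tab_getD _ (PySem.Set.nodup_ofList _) hiS' _
      have hic : (PySem.Dict.mk ((L.filter (fun e => e.1.1 == i)).map
          (fun e => (e.1.2, e.2)))).contains p = false := by
        rw [PySem.Dict.contains_mk, Bool.eq_false_iff]
        intro hany
        obtain ⟨q, hq, hqp⟩ := List.any_eq_true.mp hany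
        obtain ⟨k, hk, rfl⟩ := List.mem_map.mp hq
        have h1 : k.1.1 = i := eq_of_beq (List.mem_filter.mp hk).2
        have h2 : k.1.2 = p := eq_of_beq hqp
        apply hx
        exact List.mem_map.mpr ⟨k, List.mem_of_mem_filter hk, Prod.ext h1 h2⟩
      have hins : (PySem.Dict.mk ((L.filter (fun e => e.1.1 == i)).map
            (fun e => (e.1.2, e.2)))).insert p n
          = PySem.Dict.mk (((L.filter (fun e => e.1.1 == i)).map
            (fun e => (e.1.2, e.2))) ++ [(p, n)]) := by
        apply PySem.Dict.ext
        rw [PySem.Dict.items_insert_of_not_contains _ _ hic]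
      show (((GG L).setdefault i PySem.Dict.empty).insert i
          ((((GG L).setdefault i PySem.Dict.empty).getD i PySem.Dict.empty).insert p n))
        = GG (L ++ [((i, p), n)])
      rw [PySem.Dict.setdefault_of_contains _ _ hcont, hgetD, hins]
      unfold GG
      rw [tab_insert_mem _ hiS']
      rw [show PySem.Set.ofList ((L ++ [((i, p), n)]).map (fun e => e.1.1))
            = PySem.Set.ofList (L.map (fun e => e.1.1)) by
          rw [show (L ++ [((i, p), n)]).map (fun e => e.1.1)
                = L.map (fun e => e.1.1) ++ [i] by simp,
              PySem.Set.ofList_append_singleton, PySem.Set.add_of_mem hiS']]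
      apply congrArg PySem.Dict.mk
      apply List.map_congr_left
      intro j _
      by_cases hji : j = i
      · subst hji
        rw [hfilteri]
        simp
      · have hb : (j == i) = false := beq_eq_false_iff_ne.mpr hji
        rw [hb, hfilterne j hji]
        simp
    · -- fresh item: a new singleton inner dict is appended at the end
      have hiS' : i ∉ PySem.Set.ofList (L.map (fun e => e.1.1)) := fun hm =>
        hiS ((PySem.Set.mem_ofList _ _).mp hm)
      have hcont : (GG L).contains i = false := by
        rw [Bool.eq_false_iff]
        intro hc
        exact hiS' ((tab_contains _ _ _).mp hc)
      have hd1 : (GG L).setdefault i PySem.Dict.empty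
          = PySem.Dict.mk ((PySem.Set.ofList (L.map (fun e => e.1.1))).map
              (fun j => (j, PySem.Dict.mk ((L.filter (fun e => e.1.1 == j)).map
                (fun e => (e.1.2, e.2))))) ++ [(i, PySem.Dict.empty)]) := by
        rw [PySem.Dict.setdefault_of_not_contains _ _ hcont]
        unfold GG
        exact tab_insert_not_mem _ hiS' _
      have hkeysd1 : (PySem.Dict.mk ((PySem.Set.ofList (L.map (fun e => e.1.1))).map
              (fun j => (j, PySem.Dict.mk ((L.filter (fun e => e.1.1 == j)).map
                (fun e => (e.1.2, e.2))))) ++ [(i, PySem.Dict.empty)])).keys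
          = PySem.Set.ofList (L.map (fun e => e.1.1)) ++ [i] := by
        rw [PySem.Dict.keys_mk, List.map_append, List.map_map]
        simp [Function.comp_def]
      have hgetD : (PySem.Dict.mk ((PySem.Set.ofList (L.map (fun e => e.1.1))).map
              (fun j => (j, PySem.Dict.mk ((L.filter (fun e => e.1.1 == j)).map
                (fun e => (e.1.2, e.2))))) ++ [(i, PySem.Dict.empty)])).getD i PySem.Dict.empty
          = PySem.Dict.empty := by
        apply PySem.Dict.getD_of_mem_items
        · exact List.mem_append_right _ (by simp)
        · rw [hkeysd1]
          rw [List.nodup_append]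
          exact ⟨PySem.Set.nodup_ofList _, List.nodup_singleton _,
            fun a ha b hb hab => by
              rw [hab, List.mem_singleton.mp hb] at ha; exact hiS' ha⟩
      have hempins : PySem.Dict.empty.insert p n = PySem.Dict.mk [(p, n)] := rfl
      have hLfilter : L.filter (fun e => e.1.1 == i) = [] := by
        rw [List.filter_eq_nil_iff]
        intro k hk hki
        exact hiS (List.mem_map.mpr ⟨k, hk, eq_of_beq hki⟩)
      show (((GG L).setdefault i PySem.Dict.empty).insert i
          ((((GG L).setdefault i PySem.Dict.empty).getD i PySem.Dict.empty).insert p n))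
        = GG (L ++ [((i, p), n)])
      rw [hd1, hgetD, hempins]
      apply PySem.Dict.ext
      rw [PySem.Dict.items_insert_of_contains _ _ (by
        rw [PySem.Dict.contains_iff_mem_keys, hkeysd1]
        exact List.mem_append_right _ (by simp))]
      rw [List.map_append]
      unfold GG
      rw [show PySem.Set.ofList ((L ++ [((i, p), n)]).map (fun e => e.1.1))
            = PySem.Set.ofList (L.map (fun e => e.1.1)) ++ [i] by
          rw [show (L ++ [((i, p), n)]).map (fun e => e.1.1)
                = L.map (fun e => e.1.1) ++ [i] by simp,
              PySem.Set.ofList_append_singleton, PySem.Set.add_of_not_mem hiS']]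
      rw [List.map_append]
      congr 1
      · rw [List.map_map]
        apply List.map_congr_left
        intro j hj
        have hji : j ≠ i := by
          intro hji; subst hji; exact hiS' hj
        have hb : (j == i) = false := beq_eq_false_iff_ne.mpr hji
        simp only [Function.comp_def, hb]
        rw [hfilterne j hji]
        simp
      · simp only [List.map_cons, List.map_nil]
        rw [hfilteri, hLfilter]
        simp

theorem lemB (l : List (String × String)) :
    (PySem.Dict.counter l).items.foldl stepB PySem.Dict.empty = canon l := by
  rw [PySem.Dict.items_counter,
      lemG _ (by rw [List.map_map]; simp [Function.comp_def, PySem.Set.nodup_ofList l])]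
  unfold GG canon
  rw [show ((PySem.Set.ofList l).map (fun k => (k, (l.count k : Int)))).map (fun e => e.1.1)
        = (PySem.Set.ofList l).map (fun k => k.1) by rw [List.map_map]; rfl]
  rw [ofList_map_ofList l (fun k => k.1)]
  apply congrArg PySem.Dict.mk
  apply List.map_congr_left
  intro i _
  refine Prod.ext rfl ?_
  show PySem.Dict.mk ((((PySem.Set.ofList l).map (fun k => (k, (l.count k : Int)))).filter
      (fun e => e.1.1 == i)).map (fun e => (e.1.2, e.2))) = innerD l i
  rw [List.filter_map, List.map_map]
  unfold innerD pricesOf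
  rw [List.map_map]
  apply congrArg PySem.Dict.mk
  show List.map _ ((PySem.Set.ofList l).filter (fun k => k.1 == i))
    = List.map _ ((PySem.Set.ofList l).filter (fun k => k.1 == i))
  apply List.map_congr_left
  intro k hk
  show (k.2, (l.count k : Int)) = (k.2, (l.count (i, k.2) : Int))
  rw [← eq_of_beq (List.mem_filter.mp hk).2]

-- the per-row fold of each port succeeds and is the fold over the rows' key pairs
def keyPair (r : List (String × String)) : String × String :=
  (((PySem.Dict.ofList r).get? "id_item").getD "", ((PySem.Dict.ofList r).get? "price").getD "")

theorem foldA_some (rows : List (List (String × String)))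
    (h : ∀ r ∈ rows, ((PySem.Dict.ofList r).contains "id_item"
          && (PySem.Dict.ofList r).contains "price") = true)
    (d : PySem.Dict String (PySem.Dict String Int)) :
    rows.foldl stepArow (some d)
      = some ((rows.map keyPair).foldl (fun d x => stepA d x.1 x.2) d) := by
  induction rows generalizing d with
  | nil => rfl
  | cons r rows ih =>
    have hr := h r (by simp)
    rw [Bool.and_eq_true] at hr
    obtain ⟨h1, h2⟩ := hr
    rw [PySem.Dict.contains_eq_isSome_get?] at h1 h2
    obtain ⟨i, hi⟩ := Option.isSome_iff_exists.mp h1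
    obtain ⟨p, hp⟩ := Option.isSome_iff_exists.mp h2
    show (rows.foldl stepArow (stepArow (some d) r)) = _
    rw [show stepArow (some d) r = some (stepA d i p) by simp [stepArow, hi, hp]]
    rw [ih (fun r hr => h r (by simp [hr]))]
    show _ = some ((rows.map keyPair).foldl _ (stepA d (keyPair r).1 (keyPair r).2))
    rw [show keyPair r = (i, p) by simp [keyPair, hi, hp]]

theorem foldB_some (rows : List (List (String × String)))
    (h : ∀ r ∈ rows, ((PySem.Dict.ofList r).contains "id_item"
          && (PySem.Dict.ofList r).contains "price") = true)
    (c : PySem.Dict (String × String) Int) :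
    rows.foldl stepBrow (some c)
      = some ((rows.map keyPair).foldl (fun c x => c.insert x (c.getD x 0 + 1)) c) := by
  induction rows generalizing c with
  | nil => rfl
  | cons r rows ih =>
    have hr := h r (by simp)
    rw [Bool.and_eq_true] at hr
    obtain ⟨h1, h2⟩ := hr
    rw [PySem.Dict.contains_eq_isSome_get?] at h1 h2
    obtain ⟨i, hi⟩ := Option.isSome_iff_exists.mp h1
    obtain ⟨p, hp⟩ := Option.isSome_iff_exists.mp h2
    show (rows.foldl stepBrow (stepBrow (some c) r)) = _
    rw [show stepBrow (some c) r = some (c.insert (i, p) (c.getD (i, p) 0 + 1)) by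
      simp [stepBrow, hi, hp]]
    rw [ih (fun r hr => h r (by simp [hr]))]
    show _ = some ((rows.map keyPair).foldl _ (c.insert (keyPair r) (c.getD (keyPair r) 0 + 1)))
    rw [show keyPair r = (i, p) by simp [keyPair, hi, hp]]

-- ===== VERDICT (by name: the statement is the Claim_ definition above) =====
theorem check_prices_items_spec : Claim_equal_check_prices_items := by
  intro rows _ hpre
  have h : ∀ r ∈ rows, ((PySem.Dict.ofList r).contains "id_item"
      && (PySem.Dict.ofList r).contains "price") = true := by
    rw [Pre_check_prices_items, List.all_eq_true] at hpre
    exact hpre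
  unfold Spec_check_prices_items check_prices_items check_prices_items_alt
  rw [foldA_some rows h PySem.Dict.empty, foldB_some rows h PySem.Dict.empty]
  show ((rows.map keyPair).foldl (fun d x => stepA d x.1 x.2) PySem.Dict.empty).items.map
      (fun e => (e.1, e.2.items))
    = (((rows.map keyPair).foldl (fun c x => c.insert x (c.getD x 0 + 1))
        PySem.Dict.empty).items.foldl stepB PySem.Dict.empty).items.map
      (fun e => (e.1, e.2.items))
  rw [lemA, PySem.Dict.foldl_insert_getD_add_one_eq_counter, lemB]
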